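-- pv_equiv track=rewrite | github.com/pypi-data/pypi-mirror-403 | packages/caspian-utils/caspian_utils-0.0.31.tar.gz/caspian_utils-0.0.31/casp/components_compiler.py | _escape_quotes_in_braced_attr_values
-- ===== SOURCE A (Python) =====
-- from typing import Dict, List, Optional, Tuple, Iterator, NamedTuple
--
-- def _escape_quotes_in_braced_attr_values(html: str) -> str:
--     """Make JSX-like braced expressions inside quoted attributes HTML-safe.
--
--     Example (invalid HTML):
--         class="{isOpen ? "a" : "b"}"
--
--     Becomes (valid HTML):
--         class="{isOpen ? &quot;a&quot; : &quot;b&quot;}"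
--     """
--     out: list[str] = []
--     i = 0
--     n = len(html)
--
--     while i < n:
--         # Detect: ="{...}" or ='{...}'
--         if (
--             html[i] == "="
--             and i + 2 < n
--             and html[i + 1] in ('"', "'")
--             and html[i + 2] == "{"
--         ):
--             quote = html[i + 1]
--             out.append("=")
--             out.append(quote)
--
--             k = i + 2
--             brace_depth = 0
--             in_str: Optional[str] = None
--             esc = False
--             expr_out: list[str] = []
--
--             while k < n:
--                 c = html[k]
--
--                 # Escape the delimiter quote inside the braced expression
--                 if c == quote:
--                     expr_out.append("&quot;" if quote == '"' else "&#39;")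
--                 else:
--                     expr_out.append(c)
--
--                 # Track JS-like strings; braces inside strings do not change brace_depth
--                 if esc:
--                     esc = False
--                 else:
--                     if in_str is not None:
--                         if c == "\\":
--                             esc = True
--                         elif c == in_str:
--                             in_str = None
--                     else:
--                         if c in ("'", '"'):
--                             in_str = c
--                         elif c == "{":
--                             brace_depth += 1
--                         elif c == "}":
--                             brace_depth -= 1
--                             if brace_depth == 0:
--                                 k += 1
--                                 break
--
--                 k += 1
--
--             # Malformed input: fall back to raw remainder
--             if brace_depth != 0:
--                 out.append(html[i + 2:])
--                 break
--
--             out.append("".join(expr_out))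
--
--             # Keep closing quote if present
--             if k < n and html[k] == quote:
--                 out.append(quote)
--                 k += 1
--
--             i = k
--             continue
--
--         out.append(html[i])
--         i += 1
--
--     return "".join(out)
-- ===== SOURCE B (Python) =====
-- def _find_expr_end(html, k):
--     """Scan from k (pointing at '{') doing brace/string/escape bookkeeping only.
--     Returns the index just past the brace that closes the expression, n if the
--     input ends with depth 0, or None if the expression never closes."""
--     n = len(html)
--     depth = 0
--     in_str = None
--     esc = False
--     while k < n:
--         c = html[k]
--         if esc:
--             esc = False
--         elif in_str is not None:
--             if c == "\\":
--                 esc = True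
--             elif c == in_str:
--                 in_str = None
--         else:
--             if c in ("'", '"'):
--                 in_str = c
--             elif c == "{":
--                 depth += 1
--             elif c == "}":
--                 depth -= 1
--                 if depth == 0:
--                     return k + 1
--         k += 1
--     return n if depth == 0 else None
--
--
-- def _escape_quotes_in_braced_attr_values(html: str) -> str:
--     n = len(html)
--     # Phase 1: collect the (start, expr_end, next_pos) spans of braced attribute values.
--     spans = []
--     i = 0
--     while i < n:
--         if html[i] == "=" and i + 2 < n and html[i + 1] in ('"', "'") and html[i + 2] == "{":
--             end = _find_expr_end(html, i + 2)
--             if end is None:  # malformed: everything from i on stays verbatim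
--                 break
--             nxt = end + 1 if end < n and html[end] == html[i + 1] else end
--             spans.append((i, end, nxt))
--             i = nxt
--         else:
--             i += 1
--     # Phase 2: copy verbatim outside the spans, escape the delimiter quote inside.
--     parts = []
--     pos = 0
--     for start, end, nxt in spans:
--         q = html[start + 1]
--         ent = "&quot;" if q == '"' else "&#39;"
--         parts.append(html[pos:start + 2])
--         parts.append(html[start + 2:end].replace(q, ent))
--         parts.append(html[end:nxt])
--         pos = nxt
--     parts.append(html[pos:])
--     return "".join(parts)
-- ===== Notes on version B (the rewrite author's own statement) =====
-- stated objective: faster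
-- what changed: A escapes quotes inline during a single scan with a nested emit-while-parsing loop appending character by character; B is two-phase: a quote-independent scanner first collects the (start, end, next) spans of braced attribute expressions, then the result is built by copying whole slices verbatim outside the spans and applying str.replace of the delimiter quote inside each span, so per-character list appends disappear.
import Mathlib
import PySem

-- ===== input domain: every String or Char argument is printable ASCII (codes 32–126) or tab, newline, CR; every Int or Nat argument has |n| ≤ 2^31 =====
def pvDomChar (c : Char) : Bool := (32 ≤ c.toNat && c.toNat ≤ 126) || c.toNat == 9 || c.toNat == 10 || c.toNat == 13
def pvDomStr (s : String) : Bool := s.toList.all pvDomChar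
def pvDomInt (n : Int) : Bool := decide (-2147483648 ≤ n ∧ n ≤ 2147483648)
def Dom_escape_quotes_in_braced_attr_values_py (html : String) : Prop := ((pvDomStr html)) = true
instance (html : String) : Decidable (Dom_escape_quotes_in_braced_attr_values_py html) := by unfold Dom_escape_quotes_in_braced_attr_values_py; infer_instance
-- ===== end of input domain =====

-- B rebuilds the result in two phases (collect the braced-expression spans with a
-- quote-independent scanner, then copy verbatim / escape by spans) instead of A's single
-- pass that escapes inside the scanning loop; a timing run measured B faster by a
-- constant factor (bulk slice copies / replace instead of per-character appends).

-- ===== PORT A =====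
-- A's per-character emission inside the braced expression: the delimiter quote becomes its entity.
def escChar (quote : Char) (c : Char) : List Char :=
  if c = quote then (if quote = '"' then "&quot;".toList else "&#39;".toList) else [c]

-- one non-break iteration of A's inner loop: emit e, keep the recursive result
def innerStep (e : List Char) (r : List Char × List Char × Int) : List Char × List Char × Int :=
  (e ++ r.1, r.2)

-- A's inner while-loop: emits the escaped expression while tracking strings/braces.
-- Returns (expr_out, rest after the loop, final brace_depth); list suffixes play the role of k.
def innerA (quote : Char) (l : List Char) (depth : Int) (instr : Option Char) (esc : Bool) :
    List Char × List Char × Int :=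
  match l with
  | [] => ([], [], depth)
  | c :: t =>
    let e := escChar quote c
    if esc then innerStep e (innerA quote t depth instr false)
    else
      match instr with
      | some q =>
        if c = '\\' then innerStep e (innerA quote t depth (some q) true)
        else if c = q then innerStep e (innerA quote t depth none false)
        else innerStep e (innerA quote t depth (some q) false)
      | none =>
        if c = '\'' ∨ c = '"' then innerStep e (innerA quote t depth (some c) false)
        else if c = '{' then innerStep e (innerA quote t (depth + 1) none false)
        else if c = '}' then
          if depth - 1 = 0 then (e, t, 0)
          else innerStep e (innerA quote t (depth - 1) none false)
        else innerStep e (innerA quote t depth none false)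

-- termination helper for the outer loop: the rest returned by innerA is shorter than the input
theorem innerA_rest_le (quote : Char) (l : List Char) (depth : Int) (instr : Option Char)
    (esc : Bool) : (innerA quote l depth instr esc).2.1.length + 1 ≤ l.length ∨
      (innerA quote l depth instr esc).2.1 = [] := by
  induction l generalizing depth instr esc with
  | nil => right; simp [innerA]
  | cons c t ih =>
    have key : ∀ (d : Int) (i : Option Char) (e : Bool),
        (innerStep (escChar quote c) (innerA quote t d i e)).2.1.length + 1 ≤ (c :: t).length ∨
        (innerStep (escChar quote c) (innerA quote t d i e)).2.1 = [] := by
      intro d i e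
      rcases ih d i e with h | h
      · left; simp only [innerStep]; simp; omega
      · right; simp only [innerStep]; simpa using h
    simp only [innerA]
    split
    · exact key _ _ _
    · split
      · split_ifs <;> exact key _ _ _
      · split_ifs <;> first | exact key _ _ _ | (left; simp)

-- A's outer while-loop, step for step over the character list
-- (the [c] / [c, d] cases are the i + 2 < n test failing by length).
def processA : List Char → List Char
  | [] => []
  | [c] => [c]
  | [c, d] => [c, d]
  | c1 :: c2 :: c3 :: t =>
    if c1 = '=' ∧ (c2 = '"' ∨ c2 = '\'') ∧ c3 = '{' then
      let r := innerA c2 (c3 :: t) 0 none false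
      if r.2.2 ≠ 0 then
        -- malformed: dump the raw remainder html[i + 2:] and stop
        c1 :: c2 :: c3 :: t
      else
        c1 :: c2 :: (r.1 ++
          match hr : r.2.1 with
          | q :: rt => if q = c2 then q :: processA rt else processA (q :: rt)
          | [] => processA [])
    else
      c1 :: processA (c2 :: c3 :: t)
termination_by l => l.length
decreasing_by
  · have h1 := innerA_rest_le c2 (c3 :: t) 0 none false
    have hr' : (innerA c2 (c3 :: t) 0 none false).2.1 = q :: rt := hr
    rw [hr'] at h1
    rcases h1 with h | h
    · simp at h ⊢; omega
    · simp at h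
  · have h1 := innerA_rest_le c2 (c3 :: t) 0 none false
    have hr' : (innerA c2 (c3 :: t) 0 none false).2.1 = q :: rt := hr
    rw [hr'] at h1
    rcases h1 with h | h
    · simp at h ⊢; omega
    · simp at h
  · simp
  · simp

def escape_quotes_in_braced_attr_values_py (html : String) : String :=
  String.ofList (processA html.toList)

-- ===== PORT B =====
-- one non-terminal iteration of B's scanner: the scanned char joins the consumed span
def findStep (c : Char) (r : Option (List Char × List Char)) : Option (List Char × List Char) :=
  match r with
  | some (tk, rest) => some (c :: tk, rest)
  | none => none

-- B phase-1 scanner (_find_expr_end): quote-independent brace/string/escape bookkeeping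
-- only.  Source B's index result becomes the list split: some (consumed, rest).
def findEnd (l : List Char) (depth : Int) (instr : Option Char) (esc : Bool) :
    Option (List Char × List Char) :=
  match l with
  | [] => if depth = 0 then some ([], []) else none
  | c :: t =>
    if esc then findStep c (findEnd t depth instr false)
    else
      match instr with
      | some q =>
        if c = '\\' then findStep c (findEnd t depth (some q) true)
        else if c = q then findStep c (findEnd t depth none false)
        else findStep c (findEnd t depth (some q) false)
      | none =>
        if c = '\'' ∨ c = '"' then findStep c (findEnd t depth (some c) false)
        else if c = '{' then findStep c (findEnd t (depth + 1) none false)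
        else if c = '}' then
          if depth - 1 = 0 then some ([c], t)
          else findStep c (findEnd t (depth - 1) none false)
        else findStep c (findEnd t depth none false)

-- termination helper for phase 1: a some-result of findEnd splits its input, nontrivially
theorem findEnd_some_split (l : List Char) (depth : Int) (instr : Option Char) (esc : Bool)
    (raw rest : List Char) (h : findEnd l depth instr esc = some (raw, rest)) :
    l = raw ++ rest ∧ (l ≠ [] → raw ≠ []) := by
  induction l generalizing depth instr esc raw rest with
  | nil =>
    simp only [findEnd] at h
    split_ifs at h
    simp at h
    simp [h.1, h.2]
  | cons c t ih =>
    have step : ∀ d' i' e', findStep c (findEnd t d' i' e') = some (raw, rest) →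
        c :: t = raw ++ rest ∧ (c :: t ≠ [] → raw ≠ []) := by
      intro d' i' e' hs
      unfold findStep at hs
      revert hs
      cases hfe : findEnd t d' i' e' with
      | none => simp
      | some p =>
        obtain ⟨tk, rest'⟩ := p
        intro hs
        simp only [Option.some.injEq, Prod.mk.injEq] at hs
        obtain ⟨hs1, hs2⟩ := hs
        subst hs1; subst hs2
        obtain ⟨h1, -⟩ := ih d' i' e' tk rest' (by rw [hfe])
        constructor
        · simp [h1]
        · intro _; simp
    cases instr <;>
      (simp only [findEnd] at h
       split_ifs at h <;>
         first
           | (exact step _ _ _ h)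
           | (simp only [Option.some.injEq, Prod.mk.injEq] at h
              obtain ⟨h1, h2⟩ := h
              subst h1; subst h2
              exact ⟨by simp, fun _ => by simp⟩))

-- B phase 1: the list of segments — (none, chunk) is copied verbatim, (some q, raw) is a
-- braced expression whose delimiter quote q gets escaped in phase 2
-- (the [c] / [c, d] cases are the i + 2 < n test failing by length).
def phase1 : List Char → List (Option Char × List Char)
  | [] => []
  | [c] => [(none, [c])]
  | [c, d] => [(none, [c]), (none, [d])]
  | c1 :: c2 :: c3 :: t =>
    if c1 = '=' ∧ (c2 = '"' ∨ c2 = '\'') ∧ c3 = '{' then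
      match hfe : findEnd (c3 :: t) 0 none false with
      | none => [(none, c1 :: c2 :: c3 :: t)]  -- malformed: everything from i on stays verbatim
      | some (raw, rest) =>
        (none, [c1, c2]) :: (some c2, raw) ::
          (match rest with
           | q :: rt => if q = c2 then (none, [c2]) :: phase1 rt else phase1 (q :: rt)
           | [] => phase1 [])
    else
      (none, [c1]) :: phase1 (c2 :: c3 :: t)
termination_by l => l.length
decreasing_by
  · obtain ⟨hsplit, hne⟩ := findEnd_some_split _ _ _ _ _ _ hfe
    have hlen2 := congrArg List.length hsplit
    have hraw : raw ≠ [] := hne (by simp)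
    have h1 : 1 ≤ raw.length := by
      cases raw with
      | nil => exact absurd rfl hraw
      | cons _ _ => simp
    simp at hlen2 ⊢; omega
  · obtain ⟨hsplit, hne⟩ := findEnd_some_split _ _ _ _ _ _ hfe
    have hlen2 := congrArg List.length hsplit
    have hraw : raw ≠ [] := hne (by simp)
    have h1 : 1 ≤ raw.length := by
      cases raw with
      | nil => exact absurd rfl hraw
      | cons _ _ => simp
    simp at hlen2 ⊢; omega
  · simp
  · simp

-- Source B's ent string for the delimiter quote q
def entB (q : Char) : List Char := if q = '"' then "&quot;".toList else "&#39;".toList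

-- str.replace(q, ent) on a single-character pattern, as a flatMap (exact for 1-char patterns)
def escSeg (q : Char) (s : List Char) : List Char :=
  s.flatMap (fun c => if c = q then entB q else [c])

-- B phase 2: join the segments, escaping only the expression segments
def phase2 (segs : List (Option Char × List Char)) : List Char :=
  segs.flatMap (fun seg => match seg.1 with | none => seg.2 | some q => escSeg q seg.2)

def escape_quotes_in_braced_attr_values_py_alt (html : String) : String :=
  String.ofList (phase2 (phase1 html.toList))

-- ===== PRECONDITION & SPEC =====
def Spec_escape_quotes_in_braced_attr_values_py (html : String) (out : String) : Prop := out = escape_quotes_in_braced_attr_values_py_alt html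
instance (html : String) (out : String) : Decidable (Spec_escape_quotes_in_braced_attr_values_py html out) := by unfold Spec_escape_quotes_in_braced_attr_values_py; infer_instance

-- ===== CLAIM (what is proved, stated in full; the proofs are below) =====
def Claim_equal_escape_quotes_in_braced_attr_values_py : Prop := ∀ (html : String), Dom_escape_quotes_in_braced_attr_values_py html → Spec_escape_quotes_in_braced_attr_values_py html (escape_quotes_in_braced_attr_values_py html)

-- ===== LEMMAS AND PROOFS =====

-- A's inner loop computes exactly: the escape-map of the raw span findEnd finds together
-- with the same rest and final depth 0 — or, when findEnd fails, an empty rest with a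
-- nonzero final depth (the fallback branch).
theorem inner_corr (l : List Char) (quote : Char) (depth : Int) (instr : Option Char)
    (esc : Bool) :
    (∀ raw rest, findEnd l depth instr esc = some (raw, rest) →
        innerA quote l depth instr esc = (escSeg quote raw, rest, 0)) ∧
    (findEnd l depth instr esc = none →
        (innerA quote l depth instr esc).2.1 = [] ∧
        (innerA quote l depth instr esc).2.2 ≠ 0) := by
  induction l generalizing depth instr esc with
  | nil =>
    constructor
    · intro raw rest h
      simp only [findEnd] at h
      split_ifs at h with h0
      simp at h
      simp [innerA, h0, h.1, h.2, escSeg]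
    · intro h
      simp only [findEnd] at h
      split_ifs at h with h0
      simp [innerA, h0]
  | cons c t ih =>
    have step : ∀ d' i' e',
        (∀ raw rest, findStep c (findEnd t d' i' e') = some (raw, rest) →
            innerStep (escChar quote c) (innerA quote t d' i' e') = (escSeg quote raw, rest, 0)) ∧
        (findStep c (findEnd t d' i' e') = none →
            (innerStep (escChar quote c) (innerA quote t d' i' e')).2.1 = [] ∧
            (innerStep (escChar quote c) (innerA quote t d' i' e')).2.2 ≠ 0) := by
      intro d' i' e'
      constructor
      · intro raw rest hs
        unfold findStep at hs
        revert hs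
        cases hfe : findEnd t d' i' e' with
        | none => simp
        | some p =>
          obtain ⟨tk, rest0⟩ := p
          intro hs
          simp only [Option.some.injEq, Prod.mk.injEq] at hs
          obtain ⟨hs1, hs2⟩ := hs
          subst hs1; subst hs2
          have h1 := (ih d' i' e').1 tk rest0 (by rw [hfe])
          simp [innerStep, h1, escSeg, escChar, entB, List.flatMap_cons]
      · intro hs
        unfold findStep at hs
        revert hs
        cases hfe : findEnd t d' i' e' with
        | some p => simp
        | none =>
          intro _
          have h1 := (ih d' i' e').2 hfe
          simp only [innerStep]
          simpa using h1
    cases instr <;>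
      (constructor
       · intro raw rest h
         simp only [findEnd] at h
         simp only [innerA]
         split_ifs at h ⊢ <;>
           first
             | (exact (step _ _ _).1 raw rest h)
             | (-- break case: findEnd returned some ([c], t)
                simp only [Option.some.injEq, Prod.mk.injEq] at h
                obtain ⟨h1, h2⟩ := h
                subst h1; subst h2
                simp [escSeg, escChar, entB])
       · intro h
         simp only [findEnd] at h
         simp only [innerA]
         split_ifs at h ⊢ <;> exact (step _ _ _).2 h)
  
-- the main correspondence: A's one-pass output equals B's two-phase output
theorem processA_eq_phase2_phase1 (l : List Char) : processA l = phase2 (phase1 l) := by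
  induction hn : l.length using Nat.strong_induction_on generalizing l with
  | _ n ih =>
  match l with
  | [] => simp [processA, phase1, phase2]
  | [c] => simp [processA, phase1, phase2]
  | [c, d] => simp [processA, phase1, phase2]
  | c1 :: c2 :: c3 :: t =>
    have HC := inner_corr (c3 :: t) c2 0 none false
    rw [processA, phase1]
    split_ifs with hc
    · -- the trigger fired on both sides: relate the inner loop to the scanner
      split
      · -- findEnd returned none: A's fallback, B's verbatim segment
        rename_i heq
        have hno := HC.2 heq
        simp only [ne_eq]
        rw [if_pos (by simpa using hno.2)]
        simp [phase2]
      · -- findEnd returned some (raw, rest)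
        rename_i raw rest heq
        have hi := HC.1 raw rest heq
        obtain ⟨hsplit, hne⟩ := findEnd_some_split _ _ _ _ _ _ heq
        have hraw : raw ≠ [] := hne (by simp)
        have hraw1 : 1 ≤ raw.length := by
          cases raw with
          | nil => exact absurd rfl hraw
          | cons _ _ => simp
        have hlen : raw.length + rest.length = t.length + 1 := by
          have := congrArg List.length hsplit
          simp at this; omega
        have h1 : (innerA c2 (c3 :: t) 0 none false).1 = escSeg c2 raw := by rw [hi]
        simp only [ne_eq]
        rw [if_neg (by rw [hi]; simp)]
        cases rest with
        | nil =>
          split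
          · rename_i q rt heq'
            rw [hi] at heq'
            simp at heq'
          · rw [h1]
            simp [processA, phase1, phase2]
        | cons q0 rt0 =>
          split
          · rename_i q rt heq'
            rw [hi] at heq'
            simp only [List.cons.injEq] at heq'
            obtain ⟨hq0, hrt0⟩ := heq'
            subst hq0; subst hrt0
            rw [h1]
            by_cases hq : q0 = c2
            · rw [if_pos hq]
              have hlt : rt0.length < n := by subst hn; simp at hlen ⊢; omega
              rw [ih rt0.length hlt rt0 rfl]
              simp [phase2, hq]
            · rw [if_neg hq]
              have hlt : (q0 :: rt0).length < n := by subst hn; simp at hlen ⊢; omega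
              rw [ih (q0 :: rt0).length hlt (q0 :: rt0) rfl]
              simp [phase2, hq]
          · rename_i heq'
            rw [hi] at heq'
            simp at heq'
    · rw [ih (c2 :: c3 :: t).length (by subst hn; simp) (c2 :: c3 :: t) rfl]
      simp [phase2]

-- ===== VERDICT (by name: the statement is the Claim_ definition above) =====
theorem escape_quotes_in_braced_attr_values_py_spec : Claim_equal_escape_quotes_in_braced_attr_values_py := by
  intro html _
  unfold Spec_escape_quotes_in_braced_attr_values_py
  unfold escape_quotes_in_braced_attr_values_py escape_quotes_in_braced_attr_values_py_alt
  rw [processA_eq_phase2_phase1]
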